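-- pv_equiv track=rewrite | github.com/Scheggetta/coliee24 | utils.py | convert_dict
-- ===== SOURCE A (Python) =====
-- def convert_dict(original_dict, n):
--     new_dict = {}
--     for key, value in original_dict.items():
--         if key[0] in new_dict:
--             new_dict[key[0]].append((key[1], value))
--         else:
--             new_dict[key[0]] = [(key[1], value)]
--     for key, value in new_dict.items():
--         new_dict[key] = [x[0] for x in sorted(value, key=lambda x: x[1])[::-1][:n]]
--     return new_dict
-- ===== SOURCE B (Python) =====
-- def convert_dict(original_dict, n):
--     # One global stable sort by value (ascending) reversed, then a single
--     # grouping pass; each group's list is already in A's per-group order.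
--     desc = sorted(original_dict.items(), key=lambda kv: kv[1])[::-1]
--     groups = {}
--     for (k0, k1), _v in desc:
--         groups.setdefault(k0, []).append(k1)
--     return {k0: groups[k0][:n] for (k0, _k1) in original_dict}
-- ===== Notes on version B (the rewrite author's own statement) =====
-- stated objective: alternative
-- what changed: A groups first and then stable-sorts each group's (key1,value) pairs separately, reversing and slicing per group; B does one global stable sort of all items by value, reverses it once, builds the groups in a single pass over that order (so each group list is already descending with A's tie order), and applies the top-n slice per key at the end.
import Mathlib
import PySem

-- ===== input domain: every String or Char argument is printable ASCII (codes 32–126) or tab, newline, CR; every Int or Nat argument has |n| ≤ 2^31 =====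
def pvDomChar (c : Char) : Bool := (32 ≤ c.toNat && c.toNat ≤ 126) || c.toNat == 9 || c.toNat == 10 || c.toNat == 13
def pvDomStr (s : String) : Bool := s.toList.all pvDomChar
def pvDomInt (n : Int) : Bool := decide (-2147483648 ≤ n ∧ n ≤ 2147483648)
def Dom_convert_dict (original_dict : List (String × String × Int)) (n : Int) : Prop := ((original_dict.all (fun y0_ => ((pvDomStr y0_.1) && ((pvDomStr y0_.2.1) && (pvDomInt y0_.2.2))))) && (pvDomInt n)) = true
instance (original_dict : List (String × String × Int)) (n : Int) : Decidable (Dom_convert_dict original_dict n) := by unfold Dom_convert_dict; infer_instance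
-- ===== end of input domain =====

-- B replaces A's per-group sorts by ONE global stable sort followed by a grouping pass
-- and a final top-n slice per key (objective: alternative decomposition, same result).

-- ===== PORT A =====
-- first loop: group (key[1], value) pairs under key[0], branching on membership as A does
-- second loop: for each key, sorted(value, key=x[1])[::-1][:n] projected to x[0]
-- ([::-1] is ported as List.reverse, exact per PySem.List.slice?_none_none_neg_one);
-- Python reassigns every key of new_dict in place (value type changes), which Lean's
-- typing cannot express on one dict: the rebuilt dict below has the same keys in the
-- same order, each bound to the reassigned value, exactly as Python's loop leaves it
def convert_dict (original_dict : List (String × String × Int)) (n : Int) : List (String × List String) :=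
  let d1 : PySem.Dict String (List (String × Int)) :=
    original_dict.foldl (fun d e =>
      if d.contains e.1 then d.modify e.1 [] (fun v => v ++ [(e.2.1, e.2.2)])
      else d.insert e.1 [(e.2.1, e.2.2)]) PySem.Dict.empty
  let d2 : PySem.Dict String (List String) :=
    d1.items.foldl (fun d p =>
      d.insert p.1 ((PySem.List.slice (PySem.List.sorted p.2 (fun x => x.2)).reverse none (some n)).map (fun x => x.1))) PySem.Dict.empty
  d2.items

-- ===== PORT B =====
-- one global stable sort by value (ascending) reversed; one grouping pass appending key[1];
-- final dict comprehension over the original keys slicing each group to n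
def convert_dict_alt (original_dict : List (String × String × Int)) (n : Int) : List (String × List String) :=
  let desc : List (String × String × Int) :=
    (PySem.List.sorted original_dict (fun e => e.2.2)).reverse
  let groups : PySem.Dict String (List String) :=
    desc.foldl (fun d e => d.modify e.1 [] (fun v => v ++ [e.2.1])) PySem.Dict.empty
  let final : PySem.Dict String (List String) :=
    original_dict.foldl (fun d e => d.insert e.1 (PySem.List.slice (groups.getD e.1 []) none (some n))) PySem.Dict.empty
  final.items

-- ===== PRECONDITION & SPEC =====
def Spec_convert_dict (original_dict : List (String × String × Int)) (n : Int) (out : List (String × List String)) : Prop := out = convert_dict_alt original_dict n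
instance (original_dict : List (String × String × Int)) (n : Int) (out : List (String × List String)) : Decidable (Spec_convert_dict original_dict n out) := by unfold Spec_convert_dict; infer_instance

-- ===== CLAIM (what is proved, stated in full; the proofs are below) =====
def Claim_equal_convert_dict : Prop := ∀ (original_dict : List (String × String × Int)) (n : Int), Dom_convert_dict original_dict n → Spec_convert_dict original_dict n (convert_dict original_dict n)

-- ===== LEMMAS AND PROOFS =====

-- insertion sort machinery: PySem.List.sorted is the foldl of insertBy
-- (PySem.List.sorted_eq_foldl_insertBy); we show filter and map commute with it

theorem pv_insertBy_front {a : Type} (bef : a -> a -> Bool) (x : a) (l : List a)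
    (h : forall z, z ∈ l -> bef x z = true) :
    PySem.List.insertBy bef x l = x :: l := by
  cases l with
  | nil => simp [PySem.List.insertBy]
  | cons y ys => simp [PySem.List.insertBy, h y (by simp)]

theorem pv_pairwise_insertBy {a : Type} (key : a -> Int) (x : a) (l : List a)
    (h : l.Pairwise (fun u v => key u ≤ key v)) :
    (PySem.List.insertBy (fun u v => decide (key u < key v)) x l).Pairwise
      (fun u v => key u ≤ key v) := by
  induction l with
  | nil => simp [PySem.List.insertBy]
  | cons y ys ih =>
    rw [List.pairwise_cons] at h
    obtain ⟨hy, hys⟩ := h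
    by_cases hlt : key x < key y
    · rw [show PySem.List.insertBy (fun u v => decide (key u < key v)) x (y :: ys)
          = x :: y :: ys from by simp [PySem.List.insertBy, hlt]]
      refine List.pairwise_cons.2 ⟨?_, List.pairwise_cons.2 ⟨hy, hys⟩⟩
      intro z hz
      rcases List.mem_cons.1 hz with rfl | hzys
      · exact le_of_lt hlt
      · exact le_trans (le_of_lt hlt) (hy z hzys)
    · rw [show PySem.List.insertBy (fun u v => decide (key u < key v)) x (y :: ys)
          = y :: PySem.List.insertBy (fun u v => decide (key u < key v)) x ys from by
            simp [PySem.List.insertBy, hlt]]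
      refine List.pairwise_cons.2 ⟨?_, ih hys⟩
      intro z hz
      rcases (PySem.List.mem_insertBy _ _ _ _).1 hz with rfl | hzys
      · exact not_lt.1 hlt
      · exact hy z hzys

theorem pv_filter_insertBy {a : Type} (key : a -> Int) (p : a -> Bool) (x : a) (l : List a)
    (h : l.Pairwise (fun u v => key u ≤ key v)) :
    (PySem.List.insertBy (fun u v => decide (key u < key v)) x l).filter p
      = if p x then PySem.List.insertBy (fun u v => decide (key u < key v)) x (l.filter p)
        else l.filter p := by
  induction l with
  | nil => cases hp : p x <;> simp [PySem.List.insertBy, hp]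
  | cons y ys ih =>
    rw [List.pairwise_cons] at h
    obtain ⟨hy, hys⟩ := h
    by_cases hlt : key x < key y
    · rw [show PySem.List.insertBy (fun u v => decide (key u < key v)) x (y :: ys)
          = x :: y :: ys from by simp [PySem.List.insertBy, hlt]]
      have hfront : PySem.List.insertBy (fun u v => decide (key u < key v)) x
          ((y :: ys).filter p) = x :: (y :: ys).filter p := by
        apply pv_insertBy_front
        intro z hz
        have hzmem := List.mem_of_mem_filter hz
        have hxz : key x < key z := by
          rcases List.mem_cons.1 hzmem with rfl | hzys
          · exact hlt
          · exact lt_of_lt_of_le hlt (hy z hzys)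
        simpa using hxz
      cases hp : p x
      · simp [List.filter_cons, hp]
      · rw [if_pos rfl, hfront]
        simp [List.filter_cons, hp]
    · rw [show PySem.List.insertBy (fun u v => decide (key u < key v)) x (y :: ys)
          = y :: PySem.List.insertBy (fun u v => decide (key u < key v)) x ys from by
            simp [PySem.List.insertBy, hlt]]
      have ihs := ih hys
      cases hpy : p y <;> cases hpx : p x <;>
        simp [hpy, hpx, ihs, PySem.List.insertBy, hlt]

theorem pv_filter_foldl_insertBy {a : Type} (key : a -> Int) (p : a -> Bool) (xs : List a) :
    forall acc : List a, acc.Pairwise (fun u v => key u ≤ key v) ->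
    (xs.foldl (fun acc x => PySem.List.insertBy (fun u v => decide (key u < key v)) x acc) acc).filter p
      = (xs.filter p).foldl
          (fun acc x => PySem.List.insertBy (fun u v => decide (key u < key v)) x acc)
          (acc.filter p) := by
  induction xs with
  | nil => intro acc _; simp
  | cons x xs ih =>
    intro acc h
    have h2 := pv_pairwise_insertBy key x acc h
    rw [List.foldl_cons, ih _ h2, pv_filter_insertBy key p x acc h]
    cases hp : p x <;> simp [hp]

theorem pv_filter_sorted {a : Type} (key : a -> Int) (p : a -> Bool) (xs : List a) :
    (PySem.List.sorted xs key).filter p = PySem.List.sorted (xs.filter p) key := by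
  rw [PySem.List.sorted_eq_foldl_insertBy, PySem.List.sorted_eq_foldl_insertBy]
  simpa using pv_filter_foldl_insertBy key p xs [] List.Pairwise.nil

theorem pv_map_insertBy {a b : Type} (g : a -> b) (K : b -> Int) (x : a) (l : List a) :
    (PySem.List.insertBy (fun u v => decide (K (g u) < K (g v))) x l).map g
      = PySem.List.insertBy (fun u v => decide (K u < K v)) (g x) (l.map g) := by
  induction l with
  | nil => simp [PySem.List.insertBy]
  | cons y ys ih =>
    by_cases h : K (g x) < K (g y) <;> simp [PySem.List.insertBy, h, ih]

theorem pv_sorted_map {a b : Type} (g : a -> b) (K : b -> Int) (xs : List a) :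
    PySem.List.sorted (xs.map g) K = (PySem.List.sorted xs (fun x => K (g x))).map g := by
  rw [PySem.List.sorted_eq_foldl_insertBy, PySem.List.sorted_eq_foldl_insertBy, List.foldl_map]
  suffices h : forall acc : List a,
      xs.foldl (fun acc y => PySem.List.insertBy (fun u v => decide (K u < K v)) (g y) acc) (acc.map g)
        = (xs.foldl (fun acc x => PySem.List.insertBy (fun u v => decide (K (g u) < K (g v))) x acc) acc).map g by
    simpa using h []
  induction xs with
  | nil => intro acc; simp
  | cons x xs ih =>
    intro acc
    rw [List.foldl_cons, List.foldl_cons, ← pv_map_insertBy g K x acc, ih]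

theorem pv_map_slice {a b : Type} (g : a -> b) (l : List a) (a? b? : Option Int) :
    (PySem.List.slice l a? b?).map g = PySem.List.slice (l.map g) a? b? := by
  simp [PySem.List.slice, List.map_take, List.map_drop]

-- a fold of inserts whose value depends only on the key: get? characterisation
theorem pv_get?_foldl_insert_keyfun {b v : Type} (keyf : b -> String) (F : String -> v)
    (l : List b) : forall (d : PySem.Dict String v) (k : String),
    (l.foldl (fun d e => d.insert (keyf e) (F (keyf e))) d).get? k
      = if k ∈ l.map keyf then some (F k) else d.get? k := by
  induction l with
  | nil => intro d k; simp
  | cons e l ih =>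
    intro d k
    rw [List.foldl_cons, ih]
    by_cases hk : k ∈ l.map keyf
    · simp [hk]
    · by_cases hke : k = keyf e
      · subst hke
        simp [hk, PySem.Dict.get?_insert_self]
      · simp [hk, hke, PySem.Dict.get?_insert_of_ne _ _ hke]

-- A's grouping step is Dict.modify
theorem pv_stepA_eq_modify :
    (fun (d : PySem.Dict String (List (String × Int))) (e : String × String × Int) =>
      if d.contains e.1 then d.modify e.1 [] (fun v => v ++ [(e.2.1, e.2.2)])
      else d.insert e.1 [(e.2.1, e.2.2)])
    = (fun (d : PySem.Dict String (List (String × Int))) (e : String × String × Int) =>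
        d.modify e.1 [] (fun v => v ++ [(e.2.1, e.2.2)])) := by
  funext d e
  by_cases h : d.contains e.1
  · simp [h]
  · have h' : d.contains e.1 = false := by simpa using h
    simp [h, PySem.Dict.modify, PySem.Dict.getD_of_not_contains _ _ h']

theorem pv_update_nil {a : Type} [BEq a] (xs : List a) :
    PySem.Set.update ([] : PySem.Set a) xs = PySem.Set.ofList xs := by
  rw [PySem.Set.ofList_eq_foldl]; rfl


-- value of A's grouping dict at a key
theorem pv_g1 (od : List (String × String × Int)) (c : String) :
    (od.foldl (fun d e => d.modify e.1 [] (fun v => v ++ [(e.2.1, e.2.2)])) PySem.Dict.empty).getD c []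
    = (od.filter (fun e => e.1 == c)).map (fun e => (e.2.1, e.2.2)) := by
  have h := PySem.Dict.getD_foldl_modify_append
    (od.map (fun e => (e.1, (e.2.1, e.2.2)))) (PySem.Dict.empty) c
  rw [List.foldl_map] at h
  simpa [List.filter_map, Function.comp, List.map_map] using h

-- value of B's grouping dict at a key
theorem pv_g2 (l : List (String × String × Int)) (c : String) :
    (l.foldl (fun d e => d.modify e.1 [] (fun v => v ++ [e.2.1])) PySem.Dict.empty).getD c []
    = (l.filter (fun e => e.1 == c)).map (fun e => e.2.1) := by
  have h := PySem.Dict.getD_foldl_modify_append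
    (l.map (fun e => (e.1, e.2.1))) (PySem.Dict.empty) c
  rw [List.foldl_map] at h
  simpa [List.filter_map, Function.comp, List.map_map] using h

-- the per-key value A computes equals the per-key value B computes
theorem pv_core (od : List (String × String × Int)) (n : Int) (k : String) :
    (PySem.List.slice (PySem.List.sorted ((od.filter (fun e => e.1 == k)).map (fun e => (e.2.1, e.2.2))) (fun x => x.2)).reverse none (some n)).map (fun x => x.1)
    = PySem.List.slice (((PySem.List.sorted od (fun e => e.2.2)).reverse.filter (fun e => e.1 == k)).map (fun e => e.2.1)) none (some n) := by
  rw [pv_sorted_map (fun e => (e.2.1, e.2.2)) (fun x => x.2) (od.filter (fun e => e.1 == k))]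
  rw [← List.map_reverse, pv_map_slice, List.map_map]
  rw [List.filter_reverse, pv_filter_sorted (fun e => e.2.2) (fun e => e.1 == k) od]
  rfl

-- ===== VERDICT (by name: the statement is the Claim_ definition above) =====
theorem convert_dict_spec : Claim_equal_convert_dict := by
  intro od n _
  unfold Spec_convert_dict convert_dict convert_dict_alt
  rw [pv_stepA_eq_modify]
  -- names for the intermediate dicts
  set T : List (String × Int) -> List String := fun v =>
    (PySem.List.slice (PySem.List.sorted v (fun x => x.2)).reverse none (some n)).map (fun x => x.1) with hT
  set d1 : PySem.Dict String (List (String × Int)) :=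
    od.foldl (fun d e => d.modify e.1 [] (fun v => v ++ [(e.2.1, e.2.2)])) PySem.Dict.empty with hd1
  set desc : List (String × String × Int) :=
    (PySem.List.sorted od (fun e => e.2.2)).reverse with hdesc
  set groups : PySem.Dict String (List String) :=
    desc.foldl (fun d e => d.modify e.1 [] (fun v => v ++ [e.2.1])) PySem.Dict.empty with hgroups
  set F : String -> List String := fun k =>
    PySem.List.slice (groups.getD k []) none (some n) with hF
  -- keys of d1 and of B's final dict: the distinct first components, in first-occurrence order
  have hnd1 : d1.keys.Nodup := by
    have h := PySem.Dict.nodup_keys_foldl_modify_key od (fun e => e.1) []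
      (fun _ e v => v ++ [(e.2.1, e.2.2)]) PySem.Dict.empty (by simp [PySem.Dict.keys_empty])
    exact h
  have hkeys1 : d1.keys = PySem.Set.ofList (od.map (fun e => e.1)) := by
    have h := PySem.Dict.keys_foldl_modify_key od (fun e => e.1) []
      (fun _ e v => v ++ [(e.2.1, e.2.2)]) PySem.Dict.empty
    rw [PySem.Dict.keys_empty, pv_update_nil] at h
    exact h
  -- A's second loop rebuilds the dict over d1's (distinct) keys: items map pointwise
  have hA : (d1.items.foldl (fun d p => d.insert p.1 (T p.2)) PySem.Dict.empty).items
      = d1.items.map (fun p => (p.1, T p.2)) := by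
    have h := PySem.Dict.items_foldl_insert_fresh d1.items (fun p => p.1) (fun p => T p.2)
      PySem.Dict.empty (by intro a _; simp [PySem.Dict.contains_empty]) hnd1
    simpa using h
  -- B's final dict
  set finalB : PySem.Dict String (List String) :=
    od.foldl (fun d e => d.insert e.1 (F e.1)) PySem.Dict.empty with hfinal
  have hndB : finalB.keys.Nodup := by
    have h := PySem.Dict.nodup_keys_foldl_insert_key od (fun e => e.1)
      (fun _ e => F e.1) PySem.Dict.empty (by simp [PySem.Dict.keys_empty])
    exact h
  have hkeysB : finalB.keys = PySem.Set.ofList (od.map (fun e => e.1)) := by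
    have h := PySem.Dict.keys_foldl_insert_key od (fun e => e.1)
      (fun _ e => F e.1) PySem.Dict.empty
    rw [PySem.Dict.keys_empty, pv_update_nil] at h
    exact h
  have hBitems : finalB.items
      = finalB.keys.map (fun k => (k, finalB.getD k [])) :=
    PySem.Dict.items_eq_map_keys finalB hndB []
  have h1items : d1.items = d1.keys.map (fun k => (k, d1.getD k [])) :=
    PySem.Dict.items_eq_map_keys d1 hnd1 []
  rw [hA, hBitems, h1items, List.map_map, hkeys1, hkeysB]
  apply List.map_congr_left
  intro k hk
  have hkmem : k ∈ od.map (fun e => e.1) := (PySem.Set.mem_ofList _ _).1 hk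
  have hBget : finalB.get? k = some (F k) := by
    have h := pv_get?_foldl_insert_keyfun (fun e => e.1) F od PySem.Dict.empty k
    rw [if_pos hkmem] at h
    exact h
  have hBgetD : finalB.getD k [] = F k := PySem.Dict.getD_of_get?_eq_some _ _ hBget
  rw [hBgetD]
  have hg1 : d1.getD k [] = (od.filter (fun e => e.1 == k)).map (fun e => (e.2.1, e.2.2)) := pv_g1 od k
  have hg2 : groups.getD k [] = (desc.filter (fun e => e.1 == k)).map (fun e => e.2.1) := pv_g2 desc k
  simp only [Function.comp, hg1, hF, hg2, hT, hdesc]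
  exact congrArg (fun l => (k, l)) (pv_core od n k)
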